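-- pv_equiv track=rewrite | github.com/toshiaki1729/stable-diffusion-webui-dataset-tag-editor | scripts/dataset_tag_editor/dataset_tag_editor.py | get_replaced_tagset
-- ===== SOURCE A (Python) =====
-- from typing import List, Set, Optional
--
-- def get_replaced_tagset(tags: Set[str], search_tags: List[str], replace_tags: List[str]):
--     tags_to_remove = search_tags[len(replace_tags):]
--     tags_to_replace = {}
--     for i in range(min(len(search_tags), len(replace_tags))):
--         if replace_tags[i] is None or replace_tags[i] == '':
--             tags_to_remove.append(search_tags[i])
--         else:
--             tags_to_replace[search_tags[i]] = replace_tags[i]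
--     tags_removed = {t for t in tags if t not in tags_to_remove}
--     tags_replaced = {tags_to_replace.get(t) if t in tags_to_replace.keys() else t for t in tags_removed}
--     return {t for t in tags_replaced if t}
-- ===== SOURCE B (Python) =====
-- def get_replaced_tagset(tags, search_tags, replace_tags):
--     # No precomputed removal set / replacement dict: each tag is resolved on its
--     # own by one scan of the search/replace pairs (removal anywhere wins; last
--     # non-empty replacement wins; unmatched tags are kept when truthy).
--     def resolve(t):
--         repl = None
--         for i, s in enumerate(search_tags):
--             if s == t:
--                 r = replace_tags[i] if i < len(replace_tags) else None
--                 if not r: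
--                     return None  # tag is removed
--                 repl = r
--         if repl is not None:
--             return repl
--         return t if t else None
--
--     result = set()
--     for t in tags:
--         v = resolve(t)
--         if v is not None:
--             result.add(v)
--     return result
-- ===== Notes on version B (the rewrite author's own statement) =====
-- stated objective: alternative
-- what changed: B drops A's precomputed removal list and replacement dict and its three staged set comprehensions entirely: each tag is resolved independently by one direct scan of the search/replace pairs (removal anywhere wins, last non-empty replacement wins, unmatched truthy tags are kept), and the result set is built in a single pass over tags.
import Mathlib
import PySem

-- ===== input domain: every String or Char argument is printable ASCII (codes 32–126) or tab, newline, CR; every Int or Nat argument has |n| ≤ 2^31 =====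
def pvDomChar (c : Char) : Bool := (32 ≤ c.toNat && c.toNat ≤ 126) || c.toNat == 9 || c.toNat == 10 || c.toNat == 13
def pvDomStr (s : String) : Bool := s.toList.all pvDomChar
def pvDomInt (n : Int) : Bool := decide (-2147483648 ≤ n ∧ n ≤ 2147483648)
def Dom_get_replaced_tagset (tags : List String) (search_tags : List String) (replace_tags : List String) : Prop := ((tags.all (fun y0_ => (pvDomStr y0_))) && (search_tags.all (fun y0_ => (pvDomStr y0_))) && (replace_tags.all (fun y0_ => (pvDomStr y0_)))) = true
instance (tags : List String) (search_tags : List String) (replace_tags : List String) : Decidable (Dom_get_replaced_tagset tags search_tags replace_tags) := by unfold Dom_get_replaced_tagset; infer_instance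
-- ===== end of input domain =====

-- B replaces A's precomputed removal list / replacement dict and three staged set
-- comprehensions by a per-tag resolver that scans the search/replace pairs directly
-- (objective: alternative — no intermediate structures, different data flow).

-- ===== PORT A =====
-- literal port of A: remove-list + replace-dict built by an index loop, then three
-- set comprehensions (the getD default "" is never used: i < length of both lists)
def get_replaced_tagset (tags : List String) (search_tags : List String) (replace_tags : List String) : List String :=
  let tags_to_remove0 := search_tags.drop replace_tags.length
  let st := (List.range (min search_tags.length replace_tags.length)).foldl
    (fun (st : List String × PySem.Dict String String) i =>
      if replace_tags.getD i "" = "" then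
        (st.1 ++ [search_tags.getD i ""], st.2)
      else
        (st.1, st.2.insert (search_tags.getD i "") (replace_tags.getD i "")))
    (tags_to_remove0, PySem.Dict.empty)
  let tags_removed : PySem.Set String :=
    PySem.Set.ofList (tags.filter (fun t => !(st.1.contains t)))
  let tags_replaced : PySem.Set String :=
    PySem.Set.ofList (tags_removed.map (fun t =>
      if st.2.contains t then st.2.getD t t else t))
  PySem.Set.ofList (tags_replaced.filter (fun t => t ≠ ""))

-- ===== PORT B =====
-- port of B's `resolve`: the enumerate-loop over search_tags with index i into
-- replace_tags, early `return None` on removal, plus the post-loop return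
def pvResolveGo (replace_tags : List String) (t : String) : List String → Nat → Option String → Option String
  | [], _, repl =>
    match repl with
    | some v => some v
    | none => if t ≠ "" then some t else none
  | s :: ss, i, repl =>
    if s = t then
      if i < replace_tags.length then
        if replace_tags.getD i "" = "" then none
        else pvResolveGo replace_tags t ss (i + 1) (some (replace_tags.getD i ""))
      else none
    else pvResolveGo replace_tags t ss (i + 1) repl

-- port of B: one pass over `tags`, each tag resolved independently
def get_replaced_tagset_alt (tags : List String) (search_tags : List String) (replace_tags : List String) : List String :=
  tags.foldl (fun result t =>
    match pvResolveGo replace_tags t search_tags 0 none with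
    | some v => PySem.Set.add result v
    | none => result) PySem.Set.empty

-- ===== PRECONDITION & SPEC =====
def Spec_get_replaced_tagset (tags : List String) (search_tags : List String) (replace_tags : List String) (out : List String) : Prop := out = get_replaced_tagset_alt tags search_tags replace_tags
instance (tags : List String) (search_tags : List String) (replace_tags : List String) (out : List String) : Decidable (Spec_get_replaced_tagset tags search_tags replace_tags out) := by unfold Spec_get_replaced_tagset; infer_instance

-- ===== CLAIM (what is proved, stated in full; the proofs are below) =====
def Claim_equal_get_replaced_tagset : Prop := ∀ (tags : List String) (search_tags : List String) (replace_tags : List String), Dom_get_replaced_tagset tags search_tags replace_tags → Spec_get_replaced_tagset tags search_tags replace_tags (get_replaced_tagset tags search_tags replace_tags)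

-- ===== LEMMAS AND PROOFS =====

-- specification helpers: "t is removed" and "t's last non-empty replacement"
def pvRemoved (t : String) : List String → List String → Bool
  | [], _ => false
  | s :: ss, [] => (s == t) || pvRemoved t ss []
  | s :: ss, r :: rs => ((s == t) && (r == "")) || pvRemoved t ss rs

-- same, restricted to indices below the replacement list's length
def pvRemovedZ (t : String) : List String → List String → Bool
  | [], _ => false
  | _ :: _, [] => false
  | s :: ss, r :: rs => ((s == t) && (r == "")) || pvRemovedZ t ss rs

def pvLastRepl (t : String) : List String → List String → Option String
  | [], _ => none
  | _ :: _, [] => none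
  | s :: ss, r :: rs =>
    match pvLastRepl t ss rs with
    | some v => some v
    | none => if s = t ∧ r ≠ "" then some r else none

theorem pvLastRepl_nil (t : String) (ss : List String) : pvLastRepl t ss [] = none := by
  cases ss <;> rfl

theorem pvLastRepl_ne_empty (t : String) : ∀ (ss rs : List String) (v : String),
    pvLastRepl t ss rs = some v → v ≠ "" := by
  intro ss
  induction ss with
  | nil => intro rs v h; simp [pvLastRepl] at h
  | cons s ss ih =>
    intro rs v h
    cases rs with
    | nil => simp [pvLastRepl] at h
    | cons r rs =>
      cases hrec : pvLastRepl t ss rs with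
      | some w =>
        simp only [pvLastRepl, hrec] at h
        exact (Option.some.inj h) ▸ ih rs w hrec
      | none =>
        simp only [pvLastRepl, hrec] at h
        by_cases hc : s = t ∧ r ≠ ""
        · rw [if_pos hc] at h
          exact (Option.some.inj h) ▸ hc.2
        · rw [if_neg hc] at h
          cases h

theorem pvRemovedZ_nil (t : String) (s : List String) : pvRemovedZ t s [] = false := by
  cases s <;> rfl

theorem pvRemoved_split (t : String) : ∀ (s r : List String),
    (pvRemoved t s r = true ↔ t ∈ s.drop r.length ∨ pvRemovedZ t s r = true) := by
  intro s
  induction s with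
  | nil => intro r; simp [pvRemoved, pvRemovedZ]
  | cons a s ih =>
    intro r
    cases r with
    | nil =>
      simp only [pvRemoved, Bool.or_eq_true, beq_iff_eq, ih [], pvRemovedZ_nil,
        List.length_nil, List.drop_zero, List.mem_cons, Bool.false_eq_true, or_false]
      constructor <;> rintro (h | h) <;> first | exact Or.inl h.symm | exact Or.inr h
    | cons b r =>
      simp only [pvRemoved, pvRemovedZ, List.length_cons, List.drop_succ_cons,
        Bool.or_eq_true, ih r]
      tauto

-- characterization of B's per-tag resolver
theorem pv_resolve_char (replace : List String) (t : String) : ∀ (ss : List String) (i : Nat) (repl : Option String),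
    pvResolveGo replace t ss i repl =
      if pvRemoved t ss (replace.drop i) then none
      else match pvLastRepl t ss (replace.drop i) with
        | some v => some v
        | none => match repl with
          | some a => some a
          | none => if t ≠ "" then some t else none := by
  intro ss
  induction ss with
  | nil => intro i repl; simp [pvResolveGo, pvRemoved, pvLastRepl]
  | cons s ss ih =>
    intro i repl
    by_cases hi : i < replace.length
    · have hgd : replace.getD i "" = replace[i] := List.getD_eq_getElem replace "" hi
      have hdrop : replace.drop i = replace[i] :: replace.drop (i + 1) :=
        (List.getElem_cons_drop hi).symm
      rw [hdrop]
      simp only [pvResolveGo, hgd]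
      by_cases hst : s = t
      · rw [if_pos hst, if_pos hi]
        by_cases hr : replace[i] = ""
        · rw [if_pos hr]
          simp [pvRemoved, hst, hr]
        · rw [if_neg hr, ih]
          have hb : (replace[i] == "") = false := by simp [hr]
          simp only [pvRemoved, pvLastRepl, hst, beq_self_eq_true, Bool.true_and, hb,
            Bool.false_or]
          by_cases hrem : pvRemoved t ss (replace.drop (i + 1)) = true
          · simp [hrem]
          · simp only [hrem, Bool.false_eq_true, if_false]
            cases hrec : pvLastRepl t ss (replace.drop (i + 1)) <;> simp [hrec, hr]
      · rw [if_neg hst]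
        rw [ih]
        have hb : (s == t) = false := by simp [hst]
        simp only [pvRemoved, pvLastRepl, hb, Bool.false_and, Bool.false_or]
        by_cases hrem : pvRemoved t ss (replace.drop (i + 1)) = true
        · simp [hrem]
        · simp only [hrem, Bool.false_eq_true, if_false]
          cases hrec : pvLastRepl t ss (replace.drop (i + 1)) <;> cases repl <;> simp [hrec, hst]
    · have hdrop : replace.drop i = [] := List.drop_eq_nil_of_le (Nat.le_of_not_lt hi)
      have hdrop2 : replace.drop (i + 1) = [] :=
        List.drop_eq_nil_of_le (Nat.le_succ_of_le (Nat.le_of_not_lt hi))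
      rw [hdrop]
      by_cases hst : s = t
      · simp [pvResolveGo, hst, hi, pvRemoved]
      · simp only [pvResolveGo, if_neg hst]
        rw [ih, hdrop2]
        have hb : (s == t) = false := by simp [hst]
        simp only [pvRemoved, pvLastRepl, hb, Bool.false_or, pvLastRepl_nil]

theorem pv_zip_eq_range_map (s r : List String) :
    s.zip r = (List.range (min s.length r.length)).map
      (fun i => (s.getD i "", r.getD i "")) := by
  induction s generalizing r with
  | nil => simp
  | cons a s ih =>
    cases r with
    | nil => simp
    | cons b r =>
      rw [List.zip_cons_cons, ih r]
      simp only [List.length_cons, Nat.succ_min_succ, List.range_succ_eq_map,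
        List.map_cons, List.map_map]
      rfl

-- characterization of A's preprocessing fold over the zipped pairs
theorem pv_fold_char (t : String) : ∀ (s r : List String) (rm : List String) (d : PySem.Dict String String),
    (t ∈ ((s.zip r).foldl (fun (st : List String × PySem.Dict String String) p =>
        if p.2 = "" then (st.1 ++ [p.1], st.2) else (st.1, st.2.insert p.1 p.2)) (rm, d)).1
      ↔ t ∈ rm ∨ pvRemovedZ t s r = true)
    ∧ ((((s.zip r).foldl (fun (st : List String × PySem.Dict String String) p =>
        if p.2 = "" then (st.1 ++ [p.1], st.2) else (st.1, st.2.insert p.1 p.2)) (rm, d)).2).get? t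
      = match pvLastRepl t s r with
        | some v => some v
        | none => d.get? t) := by
  intro s
  induction s with
  | nil => intro r rm d; simp [pvRemovedZ, pvLastRepl]
  | cons a s ih =>
    intro r rm d
    cases r with
    | nil => simp [pvRemovedZ, pvLastRepl_nil]
    | cons b r =>
      rw [List.zip_cons_cons, List.foldl_cons]
      by_cases hb : b = ""
      · rw [if_pos hb]
        obtain ⟨ihm, ihd⟩ := ih r (rm ++ [a]) d
        constructor
        · rw [ihm]
          simp only [List.mem_append, List.mem_singleton, pvRemovedZ, hb]
          constructor
          · rintro ((h | h) | h)
            · exact Or.inl h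
            · subst h; exact Or.inr (by simp)
            · exact Or.inr (by simp [h])
          · rintro (h | h)
            · exact Or.inl (Or.inl h)
            · rcases Bool.or_eq_true_iff.mp h with h | h
              · exact Or.inl (Or.inr (by
                  have := (Bool.and_eq_true_iff.mp h).1
                  exact (eq_of_beq this).symm))
              · exact Or.inr h
        · rw [ihd]
          simp only [pvLastRepl, hb]
          cases pvLastRepl t s r <;> simp
      · rw [if_neg hb]
        obtain ⟨ihm, ihd⟩ := ih r rm (d.insert a b)
        constructor
        · rw [ihm]
          simp [pvRemovedZ, hb]
        · rw [ihd]
          simp only [pvLastRepl]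
          cases hrec : pvLastRepl t s r with
          | some v => simp
          | none =>
            by_cases hat : a = t
            · rw [if_pos ⟨hat, hb⟩]
              show (d.insert a b).get? t = some b
              rw [← hat]
              simp [PySem.Dict.get?_insert_self]
            · rw [if_neg (fun hc => hat hc.1)]
              show (d.insert a b).get? t = d.get? t
              rw [PySem.Dict.get?_insert]
              exact if_neg (fun hc => hat (Eq.symm hc))

-- fold shapes: PySem.Set.ofList-style folds commute with map and filter
theorem pv_ofList_map (f : String → String) (l s acc : List String) :
    List.foldl PySem.Set.add acc ((List.foldl PySem.Set.add s l).map f)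
      = List.foldl PySem.Set.add (List.foldl PySem.Set.add acc (s.map f)) (l.map f) := by
  induction l generalizing s acc with
  | nil => simp
  | cons x l ih =>
    by_cases hx : x ∈ s
    · rw [List.foldl_cons, PySem.Set.add_of_mem hx, ih, List.map_cons, List.foldl_cons,
        PySem.Set.add_of_mem]
      rw [List.foldl_map, PySem.Set.mem_foldl_add (f := f)]
      exact Or.inr ⟨x, hx, rfl⟩
    · rw [List.foldl_cons, PySem.Set.add_of_not_mem hx, ih, List.map_cons, List.foldl_cons]
      have h2 : List.foldl PySem.Set.add acc ((s ++ [x]).map f)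
          = PySem.Set.add (List.foldl PySem.Set.add acc (s.map f)) (f x) := by
        simp [List.foldl_append]
      rw [h2]

theorem pv_filter_foldl (p : String → Bool) (m acc : List String) :
    (List.foldl PySem.Set.add acc m).filter p
      = List.foldl PySem.Set.add (acc.filter p) (m.filter p) := by
  induction m generalizing acc with
  | nil => simp
  | cons x m ih =>
    rw [List.foldl_cons, List.filter_cons]
    by_cases hx : x ∈ acc
    · rw [PySem.Set.add_of_mem hx, ih]
      by_cases hp : p x
      · rw [if_pos hp, List.foldl_cons, PySem.Set.add_of_mem (List.mem_filter.mpr ⟨hx, hp⟩)]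
      · rw [if_neg hp]
    · rw [PySem.Set.add_of_not_mem hx, ih, List.filter_append, List.filter_cons,
        List.filter_nil]
      by_cases hp : p x
      · rw [if_pos hp, if_pos hp, List.foldl_cons,
          PySem.Set.add_of_not_mem (fun hc => hx (List.mem_filter.mp hc).1)]
      · rw [if_neg hp, if_neg hp, List.append_nil]

-- B's single pass, written as a fold of Set.add over a filtered-mapped list
theorem pv_alt_fold (rem : String → Bool) (lr : String → Option String)
    (hlr : ∀ t v, lr t = some v → v ≠ "") (ts : List String) : ∀ acc,
    ts.foldl (fun result t =>
      match (if rem t then none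
             else match lr t with
               | some v => some v
               | none => (if t ≠ "" then some t else none) : Option String) with
        | some v => PySem.Set.add result v
        | none => result) acc
    = List.foldl PySem.Set.add acc
        (((ts.filter (fun t => !(rem t))).map
            (fun t => (lr t).getD t)).filter (fun t => t ≠ "")) := by
  induction ts with
  | nil => intro acc; rfl
  | cons t ts ih =>
    intro acc
    rw [List.foldl_cons, List.filter_cons]
    by_cases hc : rem t
    · simp only [hc, Bool.not_true, Bool.false_eq_true, if_false, if_true]
      exact ih acc
    · simp only [hc, Bool.not_false, if_true, if_false, List.map_cons, List.filter_cons,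
        Bool.false_eq_true]
      cases hg : lr t with
      | some v =>
        simp only [Option.getD_some, ne_eq, hlr t v hg, not_false_eq_true, decide_true,
          if_true, List.foldl_cons]
        exact ih _
      | none =>
        simp only [Option.getD_none]
        by_cases ht : t = ""
        · simp only [ht, ne_eq, not_true_eq_false, if_false, decide_false]
          exact ih acc
        · simp only [ne_eq, ht, not_false_eq_true, if_true, decide_true, List.foldl_cons]
          exact ih _

-- ===== VERDICT (by name: the statement is the Claim_ definition above) =====
theorem get_replaced_tagset_spec : Claim_equal_get_replaced_tagset := by
  intro tags s r _
  unfold Spec_get_replaced_tagset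
  unfold get_replaced_tagset get_replaced_tagset_alt
  simp only
  -- A's range-indexed fold is the fold over the zipped pairs
  rw [show (List.range (min s.length r.length)).foldl
      (fun (st : List String × PySem.Dict String String) i =>
        if r.getD i "" = "" then (st.1 ++ [s.getD i ""], st.2)
        else (st.1, st.2.insert (s.getD i "") (r.getD i "")))
      (s.drop r.length, PySem.Dict.empty)
    = (s.zip r).foldl (fun (st : List String × PySem.Dict String String) p =>
        if p.2 = "" then (st.1 ++ [p.1], st.2) else (st.1, st.2.insert p.1 p.2))
      (s.drop r.length, PySem.Dict.empty) from by
      rw [pv_zip_eq_range_map, List.foldl_map]]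
  -- name the fold result
  set stA := (s.zip r).foldl (fun (st : List String × PySem.Dict String String) p =>
      if p.2 = "" then (st.1 ++ [p.1], st.2) else (st.1, st.2.insert p.1 p.2))
    (s.drop r.length, PySem.Dict.empty) with hstA
  have hmem : ∀ t, stA.1.contains t = pvRemoved t s r := by
    intro t
    have h := (pv_fold_char t s r (s.drop r.length) PySem.Dict.empty).1
    rw [← hstA] at h
    rw [Bool.eq_iff_iff, List.contains_iff_mem, h, pvRemoved_split]
  have hdict : ∀ t, stA.2.get? t = pvLastRepl t s r := by
    intro t
    have h := (pv_fold_char t s r (s.drop r.length) PySem.Dict.empty).2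
    rw [← hstA] at h
    rw [h]
    cases pvLastRepl t s r <;> simp [PySem.Dict.get?_empty]
  -- the mapped value on the A side is (pvLastRepl t s r).getD t
  have hf : (fun t => if stA.2.contains t then stA.2.getD t t else t)
      = (fun t => (pvLastRepl t s r).getD t) := funext fun t => by
    rw [PySem.Dict.contains_eq_isSome_get?, PySem.Dict.getD_eq_get?_getD, hdict t]
    cases pvLastRepl t s r <;> simp
  have hfil : tags.filter (fun t => !(stA.1.contains t))
      = tags.filter (fun t => !(pvRemoved t s r)) :=
    List.filter_congr (fun x _ => by rw [hmem x])
  rw [hf, hfil]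
  -- B side: rewrite the resolver and flatten the fold
  have hres : (fun (result : PySem.Set String) t =>
      match pvResolveGo r t s 0 none with
      | some v => PySem.Set.add result v
      | none => result)
      = (fun (result : PySem.Set String) t =>
      match (if pvRemoved t s r then none
             else match pvLastRepl t s r with
               | some v => some v
               | none => (if t ≠ "" then some t else none) : Option String) with
        | some v => PySem.Set.add result v
        | none => result) := by
    funext result t
    rw [pv_resolve_char r t s 0 none]
    simp
  rw [hres, pv_alt_fold (fun t => pvRemoved t s r) (fun t => pvLastRepl t s r)
    (fun t v h => pvLastRepl_ne_empty t s r v h) tags PySem.Set.empty]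
  -- both sides are now folds of Set.add over the same filtered-mapped list
  have c1 : PySem.Set.ofList ((PySem.Set.ofList (tags.filter (fun t => !(pvRemoved t s r)))).map (fun t => (pvLastRepl t s r).getD t))
      = PySem.Set.ofList ((tags.filter (fun t => !(pvRemoved t s r))).map (fun t => (pvLastRepl t s r).getD t)) := by
    have := pv_ofList_map (fun t => (pvLastRepl t s r).getD t)
      (tags.filter (fun t => !(pvRemoved t s r))) [] []
    simpa [PySem.Set.ofList_eq_foldl] using this
  rw [c1]
  have c2 := pv_filter_foldl (fun t => decide (t ≠ ""))
    ((tags.filter (fun t => !(pvRemoved t s r))).map (fun t => (pvLastRepl t s r).getD t)) []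
  simp only [PySem.Set.ofList_eq_foldl] at c2 ⊢
  rw [List.filter_nil] at c2
  rw [c2]
  have c3 := PySem.Set.ofList_ofList (((tags.filter (fun t => !(pvRemoved t s r))).map (fun t => (pvLastRepl t s r).getD t)).filter (fun t => decide (t ≠ "")))
  simp only [PySem.Set.ofList_eq_foldl] at c3
  rw [c3]
  rfl
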